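-- pv_equiv track=rewrite | github.com/alibrky04/VoFAS-Data-Label-Tool | src/batch_tool/util/sampling.py | get_common_valid_ids
-- ===== SOURCE A (Python) =====
-- def get_common_valid_ids(data, excluded_ids):
--     """Identifies Feedback IDs that are valid across ALL models."""
--     model_valid_ids = []
--
--     for model_name, model_data in data.items():
--         if "response_data" not in model_data:
--             continue
--
--         current_valid = set()
--         for r in model_data["response_data"]:
--             fid = r.get("feedback_id")
--             # Check validity: no error, has ID, not excluded
--             if "error" not in r and fid and fid not in excluded_ids:
--                 current_valid.add(fid)
--
--         model_valid_ids.append(current_valid)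
--
--     if not model_valid_ids:
--         return set()
--
--     # intersection: only keep IDs present and valid in ALL models
--     common_ids = set.intersection(*model_valid_ids)
--     return common_ids
-- ===== SOURCE B (Python) =====
-- def get_common_valid_ids(data, excluded_ids):
--     """Identifies Feedback IDs that are valid across ALL models.
--
--     One pass with a running intersection: the first model with response_data
--     seeds an ordered candidate list; every later such model only shrinks it,
--     so no per-model sets are collected."""
--     common = None
--     for model_data in data.values():
--         if "response_data" not in model_data:
--             continue
--         responses = model_data["response_data"]
--         if common is None:
--             common = []
--             for r in responses:
--                 fid = r.get("feedback_id")
--                 if "error" not in r and fid and fid not in excluded_ids and fid not in common: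
--                     common.append(fid)
--         else:
--             # candidates already passed the truthy/excluded checks in the first model
--             common = [fid for fid in common
--                       if any("error" not in r and r.get("feedback_id") == fid for r in responses)]
--     return set(common) if common is not None else set()
-- ===== Notes on version B (the rewrite author's own statement) =====
-- stated objective: alternative
-- what changed: B replaces A's two-phase 'collect one valid-id set per model, then set.intersection(*sets)' with a single pass that keeps only a running candidate list: the first model with response_data seeds an ordered list and each later such model filters it with an any() scan, so no list of sets is ever built and later models need no per-model set or excluded-id checks.
import Mathlib
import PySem

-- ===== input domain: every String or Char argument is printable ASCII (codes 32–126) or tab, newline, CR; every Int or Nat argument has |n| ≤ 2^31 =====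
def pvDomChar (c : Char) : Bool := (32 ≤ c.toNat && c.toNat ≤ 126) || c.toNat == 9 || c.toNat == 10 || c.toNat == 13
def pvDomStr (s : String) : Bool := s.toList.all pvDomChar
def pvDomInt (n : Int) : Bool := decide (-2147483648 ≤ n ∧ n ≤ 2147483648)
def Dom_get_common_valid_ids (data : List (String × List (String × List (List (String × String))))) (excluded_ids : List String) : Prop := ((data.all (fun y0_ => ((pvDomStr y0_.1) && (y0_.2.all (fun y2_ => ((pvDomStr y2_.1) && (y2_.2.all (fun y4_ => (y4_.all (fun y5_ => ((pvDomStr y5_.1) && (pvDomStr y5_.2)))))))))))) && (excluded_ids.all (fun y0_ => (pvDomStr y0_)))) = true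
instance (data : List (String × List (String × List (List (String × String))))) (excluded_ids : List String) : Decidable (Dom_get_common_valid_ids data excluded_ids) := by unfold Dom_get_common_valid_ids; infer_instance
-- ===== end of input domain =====

-- B replaces A's "collect one valid-id set per model, then set.intersection" with a single pass
-- keeping only a running candidate list that later models shrink (objective: alternative, not faster).
-- Set-valued results are compared as sets; both ports render them in first-insertion order of the first model.

-- ===== PORT A =====
-- validity test "error" not in r and fid and fid not in excluded_ids (shared helper; both Pythons spell it out)
def pvOk (excluded_ids : List String) (r : List (String × String)) (fid : String) : Bool :=
  (List.lookup "error" r).isNone && fid != "" && !(excluded_ids.contains fid)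

-- body of A's inner loop: current_valid.add(fid) when valid
def pvValidStep (excluded_ids : List String) (cur : List String) (r : List (String × String)) : List String :=
  match List.lookup "feedback_id" r with
  | some fid => if pvOk excluded_ids r fid then PySem.Set.add cur fid else cur
  | none => cur

-- A's per-model set current_valid
def pvValidSet (excluded_ids : List String) (rs : List (List (String × String))) : List String :=
  rs.foldl (pvValidStep excluded_ids) []

-- body of A's outer loop: skip models without "response_data", else append the model's set
def pvAStep (excluded_ids : List String) (acc : List (List String))
    (m : String × List (String × List (List (String × String)))) : List (List String) :=
  match List.lookup "response_data" m.2 with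
  | none => acc
  | some rs => acc ++ [pvValidSet excluded_ids rs]

def get_common_valid_ids (data : List (String × List (String × List (List (String × String))))) (excluded_ids : List String) : List String :=
  let model_valid_ids := data.foldl (pvAStep excluded_ids) []
  match model_valid_ids with
  | [] => []
  -- set.intersection(*sets): the first set's elements that lie in every other set
  -- (Python's set iteration order is not observable here: outputs are compared as sets)
  | s :: rest => s.filter (fun x => rest.all (fun t => t.contains x))

-- ===== PORT B =====
-- body of B's first-model loop: append fid when valid and not yet collected
def pvFirstStep (excluded_ids : List String) (cur : List String) (r : List (String × String)) : List String :=
  match List.lookup "feedback_id" r with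
  | some fid => if pvOk excluded_ids r fid && !(cur.contains fid) then cur ++ [fid] else cur
  | none => cur

-- B's per-candidate test against a later model: any("error" not in r and r.get("feedback_id") == fid …)
def pvModelHas (rs : List (List (String × String))) (fid : String) : Bool :=
  rs.any (fun r => (List.lookup "error" r).isNone && (List.lookup "feedback_id" r == some fid))

-- body of B's outer loop over models
def pvBStep (excluded_ids : List String) (common : Option (List String))
    (m : String × List (String × List (List (String × String)))) : Option (List String) :=
  match List.lookup "response_data" m.2 with
  | none => common
  | some rs =>
    match common with
    | none => some (rs.foldl (pvFirstStep excluded_ids) [])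
    | some c => some (c.filter (fun fid => pvModelHas rs fid))

def get_common_valid_ids_alt (data : List (String × List (String × List (List (String × String))))) (excluded_ids : List String) : List String :=
  (data.foldl (pvBStep excluded_ids) none).getD []

-- ===== PRECONDITION & SPEC =====
def Spec_get_common_valid_ids (data : List (String × List (String × List (List (String × String))))) (excluded_ids : List String) (out : List String) : Prop := out = get_common_valid_ids_alt data excluded_ids
instance (data : List (String × List (String × List (List (String × String))))) (excluded_ids : List String) (out : List String) : Decidable (Spec_get_common_valid_ids data excluded_ids out) := by unfold Spec_get_common_valid_ids; infer_instance

-- ===== CLAIM (what is proved, stated in full; the proofs are below) =====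
def Claim_equal_get_common_valid_ids : Prop := ∀ (data : List (String × List (String × List (List (String × String))))) (excluded_ids : List String), Dom_get_common_valid_ids data excluded_ids → Spec_get_common_valid_ids data excluded_ids (get_common_valid_ids data excluded_ids)

-- ===== LEMMAS AND PROOFS =====

-- the per-model valid sets A collects, as a filterMap
def pvSetsOf (excluded_ids : List String) (data : List (String × List (String × List (List (String × String))))) : List (List String) :=
  data.filterMap (fun m => (List.lookup "response_data" m.2).map (pvValidSet excluded_ids))

lemma foldl_AStep (excluded_ids : List String) (data : List (String × List (String × List (List (String × String))))) (acc : List (List String)) :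
    data.foldl (pvAStep excluded_ids) acc = acc ++ pvSetsOf excluded_ids data := by
  induction data generalizing acc with
  | nil => simp [pvSetsOf]
  | cons m l ih =>
    simp only [List.foldl_cons, pvAStep, pvSetsOf, List.filterMap_cons]
    cases h : List.lookup "response_data" m.2 <;> simp [ih, pvSetsOf]

lemma mem_valid_foldl (excluded_ids : List String) (rs : List (List (String × String))) (cur : List String) (y : String) :
    y ∈ rs.foldl (pvValidStep excluded_ids) cur ↔
      y ∈ cur ∨ ∃ r ∈ rs, List.lookup "feedback_id" r = some y ∧ pvOk excluded_ids r y = true := by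
  induction rs generalizing cur with
  | nil => simp
  | cons r rs ih =>
    simp only [List.foldl_cons, ih, pvValidStep]
    cases h : List.lookup "feedback_id" r with
    | none =>
      simp only [List.mem_cons]
      constructor
      · rintro (hc | ⟨r', hm, hl, hok⟩)
        · exact Or.inl hc
        · exact Or.inr ⟨r', Or.inr hm, hl, hok⟩
      · rintro (hc | ⟨r', (rfl | hm), hl, hok⟩)
        · exact Or.inl hc
        · simp [h] at hl
        · exact Or.inr ⟨r', hm, hl, hok⟩
    | some f =>
      by_cases hok : pvOk excluded_ids r f = true
      · simp only [hok, if_true, PySem.Set.mem_add, List.mem_cons]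
        constructor
        · rintro ((hc | rfl) | ⟨r', hm, hl, hok'⟩)
          · exact Or.inl hc
          · exact Or.inr ⟨r, Or.inl rfl, h, hok⟩
          · exact Or.inr ⟨r', Or.inr hm, hl, hok'⟩
        · rintro (hc | ⟨r', (rfl | hm), hl, hok'⟩)
          · exact Or.inl (Or.inl hc)
          · rw [h] at hl; exact Or.inl (Or.inr (Option.some_injective _ hl).symm)
          · exact Or.inr ⟨r', hm, hl, hok'⟩
      · simp only [hok, List.mem_cons]
        constructor
        · rintro (hc | ⟨r', hm, hl, hok'⟩)
          · exact Or.inl hc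
          · exact Or.inr ⟨r', Or.inr hm, hl, hok'⟩
        · rintro (hc | ⟨r', (rfl | hm), hl, hok'⟩)
          · exact Or.inl hc
          · rw [h] at hl; cases Option.some_injective _ hl; exact absurd hok' hok
          · exact Or.inr ⟨r', hm, hl, hok'⟩

lemma mem_validSet (excluded_ids : List String) (rs : List (List (String × String))) (y : String) :
    y ∈ pvValidSet excluded_ids rs ↔
      ∃ r ∈ rs, List.lookup "feedback_id" r = some y ∧ pvOk excluded_ids r y = true := by
  simp [pvValidSet, mem_valid_foldl]

lemma validSet_ok (excluded_ids : List String) (rs : List (List (String × String))) (y : String)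
    (hy : y ∈ pvValidSet excluded_ids rs) : y ≠ "" ∧ excluded_ids.contains y = false := by
  rcases (mem_validSet excluded_ids rs y).mp hy with ⟨r, _, _, hok⟩
  simp only [pvOk, Bool.and_eq_true, bne_iff_ne, Bool.not_eq_true'] at hok
  exact ⟨hok.1.2, hok.2⟩

-- for a candidate that already passed the truthy/excluded checks, B's any-test agrees with membership in A's set
lemma modelHas_eq_contains (excluded_ids : List String) (rs : List (List (String × String))) (y : String)
    (hne : y ≠ "") (hex : excluded_ids.contains y = false) :
    pvModelHas rs y = (pvValidSet excluded_ids rs).contains y := by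
  rw [Bool.eq_iff_iff]
  rw [List.contains_iff_mem, mem_validSet]
  simp only [pvModelHas, List.any_eq_true, Bool.and_eq_true, Option.isNone_iff_eq_none, beq_iff_eq]
  constructor
  · rintro ⟨r, hr, herr, hfid⟩
    exact ⟨r, hr, hfid, by simp only [pvOk, herr, Option.isNone_none, Bool.true_and, Bool.and_eq_true, bne_iff_ne, Bool.not_eq_true']; exact ⟨hne, hex⟩⟩
  · rintro ⟨r, hr, hfid, hok⟩
    simp only [pvOk, Bool.and_eq_true, Option.isNone_iff_eq_none] at hok
    exact ⟨r, hr, hok.1.1, hfid⟩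

-- B's first-model loop body computes exactly A's set-building body
lemma firstStep_eq_validStep (excluded_ids : List String) (cur : List String) (r : List (String × String)) :
    pvFirstStep excluded_ids cur r = pvValidStep excluded_ids cur r := by
  unfold pvFirstStep pvValidStep PySem.Set.add
  cases List.lookup "feedback_id" r with
  | none => rfl
  | some f =>
    cases hok : pvOk excluded_ids r f <;> cases hc : cur.contains f <;> simp [hok]

lemma foldl_B_some (excluded_ids : List String) (l : List (String × List (String × List (List (String × String))))) (c : List String)
    (hc : ∀ x ∈ c, x ≠ "" ∧ excluded_ids.contains x = false) :
    l.foldl (pvBStep excluded_ids) (some c) =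
      some (c.filter (fun x => (pvSetsOf excluded_ids l).all (fun t => t.contains x))) := by
  induction l generalizing c with
  | nil => simp [pvSetsOf]
  | cons m l ih =>
    simp only [List.foldl_cons, pvBStep, pvSetsOf, List.filterMap_cons]
    cases h : List.lookup "response_data" m.2 with
    | none => simpa [pvSetsOf] using ih c hc
    | some rs =>
      simp only [Option.map_some]
      rw [ih _ (fun x hx => hc x (List.mem_of_mem_filter hx))]
      rw [List.filter_filter]
      congr 1
      apply List.filter_congr
      intro x hx
      rcases hc x hx with ⟨hne, hex⟩
      simp [pvSetsOf, modelHas_eq_contains excluded_ids rs x hne hex, Bool.and_comm]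

lemma foldl_B_none (excluded_ids : List String) (l : List (String × List (String × List (List (String × String))))) :
    l.foldl (pvBStep excluded_ids) none =
      match pvSetsOf excluded_ids l with
      | [] => none
      | s :: rest => some (s.filter (fun x => rest.all (fun t => t.contains x))) := by
  induction l with
  | nil => rfl
  | cons m l ih =>
    simp only [List.foldl_cons, pvBStep, pvSetsOf, List.filterMap_cons]
    cases h : List.lookup "response_data" m.2 with
    | none => simpa [pvSetsOf] using ih
    | some rs =>
      simp only [Option.map_some]
      have hfold : rs.foldl (pvFirstStep excluded_ids) [] = pvValidSet excluded_ids rs := by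
        unfold pvValidSet
        exact PySem.List.foldl_congr_mem rs _ _ _ (fun cur r _ => firstStep_eq_validStep excluded_ids cur r)
      rw [hfold, foldl_B_some excluded_ids l _ (fun x hx => validSet_ok excluded_ids rs x hx)]
      rfl

-- ===== VERDICT (by name: the statement is the Claim_ definition above) =====
theorem get_common_valid_ids_spec : Claim_equal_get_common_valid_ids := by
  intro data excluded_ids _
  unfold Spec_get_common_valid_ids get_common_valid_ids get_common_valid_ids_alt
  rw [foldl_AStep, foldl_B_none]
  simp only [List.nil_append]
  cases pvSetsOf excluded_ids data <;> rfl
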